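-- pv_equiv track=rewrite | github.com/Rwata56/Desafios-de-Treino | src/desafios_de_treino/maximize_segments.py | maximize_segments
-- ===== SOURCE A (Python) =====
-- def maximize_segments(n: int, p: int, q: int, r: int) -> int:
--     """
--     Retorna o número máximo de segmentos de tamanho p, q ou r
--     que podem ser usados para formar exatamente n.
--
--     Se não for possível, retorna 0.
--     """
--     if n < 0:
--         raise ValueError("n deve ser um número não negativo")
--     if p <= 0 or q <= 0 or r <= 0:
--         raise ValueError("p, q e r devem ser maiores que zero")
--
--     # dp[i] = máximo de segmentos para comprimento i
--     dp = [-1] * (n + 1)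
--     dp[0] = 0
--
--     for i in range(1, n + 1):
--         for seg in (p, q, r):
--             if i - seg >= 0 and dp[i - seg] != -1:
--                 dp[i] = max(dp[i], dp[i - seg] + 1)
--
--     return max(dp[n], 0)
-- ===== SOURCE B (Python) =====
-- def maximize_segments(n: int, p: int, q: int, r: int) -> int:
--     """
--     Mesmo resultado que a versao DP: maximo de segmentos p/q/r somando n, 0 se impossivel.
--     Estrategia: num otimo, cada moeda estritamente maior que a minima m aparece < m vezes
--     (trocar m copias dela por copias de m aumenta a contagem); moedas iguais a m se fundem em m.
--     Entao enumeramos apenas contagens pequenas das duas moedas maiores e completamos com m.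
--     """
--     if n < 0:
--         raise ValueError("n deve ser um número não negativo")
--     if p <= 0 or q <= 0 or r <= 0:
--         raise ValueError("p, q e r devem ser maiores que zero")
--
--     m = min(p, q, r)
--     y = max(p, q, r)
--     x = p + q + r - m - y  # the middle one
--     best = -1
--     bx = 0 if x == m else min(m - 1, n // x)
--     for b in range(bx + 1):
--         by = 0 if y == m else min(m - 1, (n - b * x) // y)
--         for c in range(by + 1):
--             rem = n - b * x - c * y
--             if rem % m == 0:
--                 cand = b + c + rem // m
--                 if cand > best:
--                     best = cand
--     return max(best, 0)
-- ===== Notes on version B (the rewrite author's own statement) =====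
-- stated objective: faster
-- what changed: Replaced the O(n) dp-table over all amounts by direct enumeration of the counts of the two larger segment sizes (each provably < min(p,q,r) in an optimal solution, by a coin-exchange argument), padding the remainder with the smallest size; no table is built.
import Mathlib
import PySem

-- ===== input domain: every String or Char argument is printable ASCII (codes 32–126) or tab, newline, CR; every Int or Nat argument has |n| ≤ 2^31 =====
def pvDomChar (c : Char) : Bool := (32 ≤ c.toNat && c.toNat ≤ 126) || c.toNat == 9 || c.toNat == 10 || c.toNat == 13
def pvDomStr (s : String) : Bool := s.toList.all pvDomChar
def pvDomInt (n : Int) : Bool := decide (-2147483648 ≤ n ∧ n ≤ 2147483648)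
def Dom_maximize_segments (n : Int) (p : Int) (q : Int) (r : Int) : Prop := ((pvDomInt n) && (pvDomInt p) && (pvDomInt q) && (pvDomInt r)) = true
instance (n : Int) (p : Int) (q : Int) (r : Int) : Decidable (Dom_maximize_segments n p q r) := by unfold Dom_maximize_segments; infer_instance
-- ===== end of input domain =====

-- B replaces A's O(n) dp table by bounded enumeration of the counts of the two larger
-- segment sizes (each < min(p,q,r) in an optimum, by a coin-exchange argument), padding
-- with the smallest size; measurably faster for growing n.

-- ===== PORT A =====
-- Indices are always in range under Pre_ (1 ≤ i ≤ n, 0 ≤ i-seg < i), so pyGetD/pySetD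
-- defaults are never used there.
def maximize_segments (n : Int) (p : Int) (q : Int) (r : Int) : Int :=
  if n < 0 then 0           -- Python: raise ValueError (excluded by Pre_)
  else if p ≤ 0 ∨ q ≤ 0 ∨ r ≤ 0 then 0   -- Python: raise ValueError (excluded by Pre_)
  else
    let dp0 : List Int := PySem.List.pySetD (List.replicate (n + 1).toNat (-1)) 0 0
    let dp := (PySem.List.pyRange 1 (n + 1) 1).foldl (fun dp i =>
        [p, q, r].foldl (fun dp seg =>
          if i - seg ≥ 0 ∧ PySem.List.pyGetD dp (i - seg) (-1) ≠ -1 then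
            PySem.List.pySetD dp i
              (max (PySem.List.pyGetD dp i (-1)) (PySem.List.pyGetD dp (i - seg) (-1) + 1))
          else dp) dp) dp0
    max (PySem.List.pyGetD dp n (-1)) 0

-- ===== PORT B =====
def maximize_segments_alt (n : Int) (p : Int) (q : Int) (r : Int) : Int :=
  if n < 0 then 0           -- Python: raise ValueError (excluded by Pre_)
  else if p ≤ 0 ∨ q ≤ 0 ∨ r ≤ 0 then 0   -- Python: raise ValueError (excluded by Pre_)
  else
    let m := min p (min q r)
    let y := max p (max q r)
    let x := p + q + r - m - y
    let bx := if x = m then 0 else min (m - 1) (PySem.Int.floordiv n x)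
    let best := (PySem.List.pyRange 0 (bx + 1) 1).foldl (fun best b =>
        let by_ := if y = m then 0 else min (m - 1) (PySem.Int.floordiv (n - b * x) y)
        (PySem.List.pyRange 0 (by_ + 1) 1).foldl (fun best c =>
            let rem := n - b * x - c * y
            if PySem.Int.mod rem m = 0 then
              let cand := b + c + PySem.Int.floordiv rem m
              if cand > best then cand else best
            else best) best) (-1)
    max best 0

-- ===== PRECONDITION & SPEC =====
-- Pre_ excludes exactly the inputs on which the Python A raises ValueError.
def Pre_maximize_segments (n : Int) (p : Int) (q : Int) (r : Int) : Prop :=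
  0 ≤ n ∧ 0 < p ∧ 0 < q ∧ 0 < r
instance (n : Int) (p : Int) (q : Int) (r : Int) : Decidable (Pre_maximize_segments n p q r) := by
  unfold Pre_maximize_segments; infer_instance
def pvWitness_maximize_segments : Int × Int × Int × Int := (7, 2, 3, 5)

def Spec_maximize_segments (n : Int) (p : Int) (q : Int) (r : Int) (out : Int) : Prop := out = maximize_segments_alt n p q r
instance (n : Int) (p : Int) (q : Int) (r : Int) (out : Int) : Decidable (Spec_maximize_segments n p q r out) := by unfold Spec_maximize_segments; infer_instance

-- ===== CLAIM (what is proved, stated in full; the proofs are below) =====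
def Claim_equal_maximize_segments : Prop := ∀ (n : Int) (p : Int) (q : Int) (r : Int), Dom_maximize_segments n p q r → Pre_maximize_segments n p q r → Spec_maximize_segments n p q r (maximize_segments n p q r)

-- ===== LEMMAS AND PROOFS =====

-- the one-segment relaxation used by both A's inner loop and the spec recurrence
def segStep (v acc : Int) : Int := if v ≠ -1 then max acc (v + 1) else acc

-- F p q r i = value of A's dp cell i (max number of segments summing to i, or -1)
def F (p q r : Int) : Nat → Int
  | 0 => 0
  | (i+1) =>
    let a1 := if _h : 1 ≤ p ∧ p ≤ (i : Int) + 1 then segStep (F p q r ((i : Int) + 1 - p).toNat) (-1) else -1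
    let a2 := if _h : 1 ≤ q ∧ q ≤ (i : Int) + 1 then segStep (F p q r ((i : Int) + 1 - q).toNat) a1 else a1
    if _h : 1 ≤ r ∧ r ≤ (i : Int) + 1 then segStep (F p q r ((i : Int) + 1 - r).toNat) a2 else a2
termination_by i => i
decreasing_by all_goals omega

lemma segStep_ge (v acc : Int) : acc ≤ segStep v acc := by
  unfold segStep; split_ifs <;> omega

lemma segStep_ge_val (v acc : Int) (h : v ≠ -1) : v + 1 ≤ segStep v acc := by
  unfold segStep; rw [if_pos h]; omega

lemma segStep_cases (v acc : Int) : segStep v acc = acc ∨ (v ≠ -1 ∧ segStep v acc = v + 1) := by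
  unfold segStep; split_ifs with h
  · rcases max_choice acc (v + 1) with h' | h'
    · exact Or.inl h'
    · exact Or.inr ⟨h, h'⟩
  · exact Or.inl rfl

-- one ite-phrased relaxation step of the F recurrence (matches the inner-loop fold)
def gseg (p q r : Int) (j : Nat) (s acc : Int) : Int :=
  if 1 ≤ s ∧ s ≤ (j : Int) + 1 then segStep (F p q r ((j : Int) + 1 - s).toNat) acc else acc

-- the body of F at a successor
def Fbody (p q r : Int) (j : Nat) : Int :=
  gseg p q r j r (gseg p q r j q (gseg p q r j p (-1)))

lemma F_zero (p q r : Int) : F p q r 0 = 0 := by rw [F]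

lemma F_succ (p q r : Int) (j : Nat) : F p q r (j + 1) = Fbody p q r j := by
  unfold Fbody gseg
  rw [F]
  simp only [dite_eq_ite]

lemma gseg_ge (p q r : Int) (j : Nat) (s acc : Int) : acc ≤ gseg p q r j s acc := by
  unfold gseg; split_ifs
  · exact segStep_ge _ _
  · omega

lemma F_ge_neg1 (p q r : Int) (i : Nat) : -1 ≤ F p q r i := by
  cases i with
  | zero => rw [F_zero]; omega
  | succ j =>
    rw [F_succ]
    have h1 := gseg_ge p q r j p (-1)
    have h2 := gseg_ge p q r j q (gseg p q r j p (-1))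
    have h3 := gseg_ge p q r j r (gseg p q r j q (gseg p q r j p (-1)))
    unfold Fbody; omega

lemma F_succ_ge (p q r : Int) (j : Nat) (s : Int) (hmem : s = p ∨ s = q ∨ s = r)
    (h1 : 1 ≤ s) (h2 : s ≤ (j : Int) + 1) (hne : F p q r ((j : Int) + 1 - s).toNat ≠ -1) :
    F p q r ((j : Int) + 1 - s).toNat + 1 ≤ F p q r (j + 1) := by
  rw [F_succ]
  have hs : ∀ acc, F p q r ((j : Int) + 1 - s).toNat + 1 ≤ gseg p q r j s acc := by
    intro acc; unfold gseg; rw [if_pos ⟨h1, h2⟩]; exact segStep_ge_val _ _ hne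
  unfold Fbody
  rcases hmem with h | h | h
  · rw [h] at hs ⊢
    have h1' := hs (-1)
    have g2 := gseg_ge p q r j q (gseg p q r j p (-1))
    have g3 := gseg_ge p q r j r (gseg p q r j q (gseg p q r j p (-1)))
    omega
  · rw [h] at hs ⊢
    have h2' := hs (gseg p q r j p (-1))
    have g3 := gseg_ge p q r j r (gseg p q r j q (gseg p q r j p (-1)))
    omega
  · rw [h] at hs ⊢
    exact hs _

lemma gseg_cases (p q r : Int) (j : Nat) (s acc : Int) :
    gseg p q r j s acc = acc ∨
      (1 ≤ s ∧ s ≤ (j : Int) + 1 ∧ F p q r ((j : Int) + 1 - s).toNat ≠ -1 ∧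
        gseg p q r j s acc = F p q r ((j : Int) + 1 - s).toNat + 1) := by
  unfold gseg; split_ifs with h
  · rcases segStep_cases (F p q r ((j : Int) + 1 - s).toNat) acc with h' | ⟨hne, h'⟩
    · exact Or.inl h'
    · exact Or.inr ⟨h.1, h.2, hne, h'⟩
  · exact Or.inl rfl

lemma F_succ_cases (p q r : Int) (j : Nat) :
    F p q r (j + 1) = -1 ∨
      ∃ s, (s = p ∨ s = q ∨ s = r) ∧ 1 ≤ s ∧ s ≤ (j : Int) + 1 ∧
        F p q r ((j : Int) + 1 - s).toNat ≠ -1 ∧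
        F p q r (j + 1) = F p q r ((j : Int) + 1 - s).toNat + 1 := by
  rw [F_succ]; unfold Fbody
  rcases gseg_cases p q r j r (gseg p q r j q (gseg p q r j p (-1))) with h3 | ⟨a3, b3, c3, h3⟩
  · rw [h3]
    rcases gseg_cases p q r j q (gseg p q r j p (-1)) with h2 | ⟨a2, b2, c2, h2⟩
    · rw [h2]
      rcases gseg_cases p q r j p (-1) with h1 | ⟨a1, b1, c1, h1⟩
      · rw [h1]; exact Or.inl rfl
      · exact Or.inr ⟨p, Or.inl rfl, a1, b1, c1, h1⟩
    · exact Or.inr ⟨q, Or.inr (Or.inl rfl), a2, b2, c2, h2⟩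
  · exact Or.inr ⟨r, Or.inr (Or.inr rfl), a3, b3, c3, h3⟩

-- completeness: every representation's count is at most F
lemma F_complete (p q r : Int) (hp : 0 < p) (hq : 0 < q) (hr : 0 < r) :
    ∀ (i : Nat) (a b c : Int), 0 ≤ a → 0 ≤ b → 0 ≤ c →
      a * p + b * q + c * r = (i : Int) → a + b + c ≤ F p q r i := by
  intro i
  induction i using Nat.strong_induction_on with
  | _ i IH =>
    intro a b c ha hb hc heq
    have hap : 0 ≤ a * p := mul_nonneg ha hp.le
    have hbq : 0 ≤ b * q := mul_nonneg hb hq.le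
    have hcr : 0 ≤ c * r := mul_nonneg hc hr.le
    by_cases haz : a = 0
    · by_cases hbz : b = 0
      · by_cases hcz : c = 0
        · subst haz; subst hbz; subst hcz
          simp only [zero_mul, add_zero] at heq ⊢
          have : i = 0 := by omega
          rw [this, F_zero]
        · -- c ≥ 1, use coin r
          have hc1 : 1 ≤ c := by omega
          have hexp : c * r = (c - 1) * r + r := by ring
          have h0 : 0 ≤ (c - 1) * r := mul_nonneg (by omega) hr.le
          have hri : r ≤ (i : Int) := by linarith
          obtain ⟨j, rfl⟩ : ∃ j, i = j + 1 := ⟨i - 1, by omega⟩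
          have hi' : (((j : Int) + 1 - r).toNat : Int) = (j : Int) + 1 - r := by omega
          have hrep' : a * p + b * q + (c - 1) * r = ((((j : Int) + 1 - r).toNat : Nat) : Int) := by
            rw [hi']; push_cast at heq ⊢; linarith
          have hlt : ((j : Int) + 1 - r).toNat < j + 1 := by omega
          have hIH := IH _ hlt a b (c - 1) ha hb (by omega) hrep'
          have hne : F p q r ((j : Int) + 1 - r).toNat ≠ -1 := by omega
          have hstep := F_succ_ge p q r j r (Or.inr (Or.inr rfl)) (by omega) (by omega) hne
          omega
      · -- b ≥ 1, use coin q
        have hb1 : 1 ≤ b := by omega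
        have hexp : b * q = (b - 1) * q + q := by ring
        have h0 : 0 ≤ (b - 1) * q := mul_nonneg (by omega) hq.le
        have hqi : q ≤ (i : Int) := by linarith
        obtain ⟨j, rfl⟩ : ∃ j, i = j + 1 := ⟨i - 1, by omega⟩
        have hi' : (((j : Int) + 1 - q).toNat : Int) = (j : Int) + 1 - q := by omega
        have hrep' : a * p + (b - 1) * q + c * r = ((((j : Int) + 1 - q).toNat : Nat) : Int) := by
          rw [hi']; push_cast at heq ⊢; linarith
        have hlt : ((j : Int) + 1 - q).toNat < j + 1 := by omega
        have hIH := IH _ hlt a (b - 1) c ha (by omega) hc hrep'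
        have hne : F p q r ((j : Int) + 1 - q).toNat ≠ -1 := by omega
        have hstep := F_succ_ge p q r j q (Or.inr (Or.inl rfl)) (by omega) (by omega) hne
        omega
    · -- a ≥ 1, use coin p
      have ha1 : 1 ≤ a := by omega
      have hexp : a * p = (a - 1) * p + p := by ring
      have h0 : 0 ≤ (a - 1) * p := mul_nonneg (by omega) hp.le
      have hpi : p ≤ (i : Int) := by linarith
      obtain ⟨j, rfl⟩ : ∃ j, i = j + 1 := ⟨i - 1, by omega⟩
      have hi' : (((j : Int) + 1 - p).toNat : Int) = (j : Int) + 1 - p := by omega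
      have hrep' : (a - 1) * p + b * q + c * r = ((((j : Int) + 1 - p).toNat : Nat) : Int) := by
        rw [hi']; push_cast at heq ⊢; linarith
      have hlt : ((j : Int) + 1 - p).toNat < j + 1 := by omega
      have hIH := IH _ hlt (a - 1) b c (by omega) hb hc hrep'
      have hne : F p q r ((j : Int) + 1 - p).toNat ≠ -1 := by omega
      have hstep := F_succ_ge p q r j p (Or.inl rfl) (by omega) (by omega) hne
      omega

-- soundness: a non-(-1) value of F is the count of an actual representation
lemma F_sound (p q r : Int) :
    ∀ i : Nat, F p q r i ≠ -1 →
      ∃ a b c : Int, 0 ≤ a ∧ 0 ≤ b ∧ 0 ≤ c ∧ a * p + b * q + c * r = (i : Int) ∧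
        a + b + c = F p q r i := by
  intro i
  induction i using Nat.strong_induction_on with
  | _ i IH =>
    intro hne
    match i with
    | 0 => exact ⟨0, 0, 0, le_refl _, le_refl _, le_refl _, by simp, by rw [F_zero]; norm_num⟩
    | (j+1) =>
      rcases F_succ_cases p q r j with h | ⟨s, hmem, h1, h2, hne', heq⟩
      · exact absurd h hne
      · have hlt : ((j : Int) + 1 - s).toNat < j + 1 := by omega
        have hi' : ((((j : Int) + 1 - s).toNat : Nat) : Int) = (j : Int) + 1 - s := by omega
        obtain ⟨a, b, c, ha, hb, hc, hrep, hsum⟩ := IH _ hlt hne'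
        rw [hi'] at hrep
        rcases hmem with rfl | rfl | rfl
        · exact ⟨a + 1, b, c, by omega, hb, hc, by push_cast; linarith [hrep], by omega⟩
        · exact ⟨a, b + 1, c, ha, by omega, hc, by push_cast; linarith [hrep], by omega⟩
        · exact ⟨a, b, c + 1, ha, hb, by omega, by push_cast; linarith [hrep], by omega⟩

-- model of A's dp list after the outer loop has processed amounts 1..k
def dpRow (p q r : Int) (N k : Nat) : List Int :=
  (List.range (N + 1)).map (fun j => if j ≤ k then F p q r j else -1)

lemma dpRow_length (p q r : Int) (N k : Nat) : (dpRow p q r N k).length = N + 1 := by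
  simp [dpRow]

lemma dpRow_get (p q r : Int) (N k j : Nat) (h : j < N + 1) :
    (dpRow p q r N k)[j]'(by rw [dpRow_length]; exact h) = if j ≤ k then F p q r j else -1 := by
  simp [dpRow]

lemma dpRow_set_self (p q r : Int) (N k : Nat) (_hk : k + 1 ≤ N) :
    dpRow p q r N k = (dpRow p q r N k).set (k + 1) (-1) := by
  apply List.ext_getElem
  · simp
  · intro j h1 h2
    have hj : j < N + 1 := by simpa [dpRow_length] using h1
    rw [List.getElem_set]
    by_cases he : k + 1 = j
    · rw [if_pos he, dpRow_get p q r N k j hj, if_neg (by omega)]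
    · rw [if_neg he]

lemma dpRow_set_succ (p q r : Int) (N k : Nat) (_hk : k + 1 ≤ N) :
    (dpRow p q r N k).set (k + 1) (F p q r (k + 1)) = dpRow p q r N (k + 1) := by
  apply List.ext_getElem
  · simp [dpRow_length]
  · intro j h1 h2
    have hj : j < N + 1 := by simpa [dpRow_length] using h2
    rw [List.getElem_set]
    rw [dpRow_get p q r N (k+1) j hj]
    by_cases he : k + 1 = j
    · rw [if_pos he, if_pos (by omega)]; rw [← he]
    · rw [if_neg he, dpRow_get p q r N k j hj]
      by_cases hjk : j ≤ k
      · rw [if_pos hjk, if_pos (by omega)]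
      · rw [if_neg hjk, if_neg (by omega)]

-- one inner-loop step of A, on the dp list with cell k+1 holding the running value acc
lemma stepA_eq (p q r : Int) (N k : Nat) (hk : k + 1 ≤ N) (s : Int) (hs : 1 ≤ s) (acc : Int) :
    (if (k : Int) + 1 - s ≥ 0 ∧
        PySem.List.pyGetD ((dpRow p q r N k).set (k + 1) acc) ((k : Int) + 1 - s) (-1) ≠ -1 then
      PySem.List.pySetD ((dpRow p q r N k).set (k + 1) acc) ((k : Int) + 1)
        (max (PySem.List.pyGetD ((dpRow p q r N k).set (k + 1) acc) ((k : Int) + 1) (-1))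
          (PySem.List.pyGetD ((dpRow p q r N k).set (k + 1) acc) ((k : Int) + 1 - s) (-1) + 1))
    else (dpRow p q r N k).set (k + 1) acc) =
    (dpRow p q r N k).set (k + 1) (gseg p q r k s acc) := by
  have hlen : ((dpRow p q r N k).set (k + 1) acc).length = N + 1 := by
    rw [List.length_set, dpRow_length]
  by_cases hle : s ≤ (k : Int) + 1
  · -- in-range segment: the read at k+1-s sees F of that cell
    have htk : ((k : Int) + 1 - s).toNat ≤ k := by omega
    have htlt : ((k : Int) + 1 - s).toNat < N + 1 := by omega
    have hread : PySem.List.pyGetD ((dpRow p q r N k).set (k + 1) acc) ((k : Int) + 1 - s) (-1) =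
        F p q r ((k : Int) + 1 - s).toNat := by
      rw [PySem.List.pyGetD_eq_getElem _ _ (by omega) (by rw [hlen]; push_cast; omega)]
      rw [List.getElem_set, if_neg (by omega), dpRow_get p q r N k _ htlt, if_pos htk]
    have hreadi : PySem.List.pyGetD ((dpRow p q r N k).set (k + 1) acc) ((k : Int) + 1) (-1) = acc := by
      rw [PySem.List.pyGetD_eq_getElem _ _ (by omega) (by rw [hlen]; push_cast; omega)]
      have h2 : (((k : Int) + 1).toNat) = k + 1 := by omega
      rw [List.getElem_set]
      rw [if_pos (by omega)]
    have hwrite : ∀ v : Int, PySem.List.pySetD ((dpRow p q r N k).set (k + 1) acc) ((k : Int) + 1) v =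
        (dpRow p q r N k).set (k + 1) v := by
      intro v
      rw [PySem.List.pySetD_of_nonneg _ _ (by omega)]
      have h2 : (((k : Int) + 1).toNat) = k + 1 := by omega
      rw [h2, List.set_set]
    by_cases hF : F p q r ((k : Int) + 1 - s).toNat = -1
    · rw [if_neg (by rw [hread]; tauto)]
      unfold gseg
      rw [if_pos ⟨hs, hle⟩]
      unfold segStep
      rw [if_neg (by simpa using hF)]
    · rw [if_pos ⟨by omega, by rw [hread]; exact hF⟩]
      rw [hread, hreadi, hwrite]
      unfold gseg
      rw [if_pos ⟨hs, hle⟩]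
      unfold segStep
      rw [if_pos hF]
  · -- segment larger than the amount: both sides leave the cell unchanged
    rw [if_neg (by omega)]
    unfold gseg
    rw [if_neg (by tauto)]

-- processing amount k+1 turns row k into row k+1
lemma rowStep (p q r : Int) (N k : Nat) (hk : k + 1 ≤ N) (hp : 1 ≤ p) (hq : 1 ≤ q) (hr : 1 ≤ r) :
    [p, q, r].foldl (fun dp seg =>
        if (k : Int) + 1 - seg ≥ 0 ∧ PySem.List.pyGetD dp ((k : Int) + 1 - seg) (-1) ≠ -1 then
          PySem.List.pySetD dp ((k : Int) + 1)
            (max (PySem.List.pyGetD dp ((k : Int) + 1) (-1))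
              (PySem.List.pyGetD dp ((k : Int) + 1 - seg) (-1) + 1))
        else dp) (dpRow p q r N k) = dpRow p q r N (k + 1) := by
  conv_lhs => rw [dpRow_set_self p q r N k hk]
  simp only [List.foldl_cons, List.foldl_nil]
  rw [stepA_eq p q r N k hk p hp (-1)]
  rw [stepA_eq p q r N k hk q hq _]
  rw [stepA_eq p q r N k hk r hr _]
  rw [show gseg p q r k r (gseg p q r k q (gseg p q r k p (-1))) = F p q r (k + 1) from
    (F_succ p q r k).symm]
  exact dpRow_set_succ p q r N k hk

-- the whole outer loop computes row k
lemma foldA (p q r : Int) (hp : 1 ≤ p) (hq : 1 ≤ q) (hr : 1 ≤ r) (N : Nat) :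
    ∀ k, k ≤ N → (PySem.List.pyRange 1 ((k : Int) + 1) 1).foldl (fun dp i =>
        [p, q, r].foldl (fun dp seg =>
          if i - seg ≥ 0 ∧ PySem.List.pyGetD dp (i - seg) (-1) ≠ -1 then
            PySem.List.pySetD dp i
              (max (PySem.List.pyGetD dp i (-1)) (PySem.List.pyGetD dp (i - seg) (-1) + 1))
          else dp) dp) (dpRow p q r N 0) = dpRow p q r N k := by
  intro k
  induction k with
  | zero => intro _; rw [PySem.List.pyRange_one_eq_nil (by omega), List.foldl_nil]
  | succ k IHk =>
    intro hk1
    have hcast : ((k + 1 : Nat) : Int) + 1 = ((k : Int) + 1) + 1 := by push_cast; ring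
    rw [hcast, PySem.List.pyRange_one_succ_right (by omega), List.foldl_append, IHk (by omega)]
    simp only [List.foldl_cons, List.foldl_nil]
    exact rowStep p q r N k hk1 hp hq hr

-- A's port computes max (F n, 0)
lemma A_eq (n p q r : Int) (hn : 0 ≤ n) (hp : 1 ≤ p) (hq : 1 ≤ q) (hr : 1 ≤ r) :
    maximize_segments n p q r = max (F p q r n.toNat) 0 := by
  unfold maximize_segments
  rw [if_neg (by omega), if_neg (by omega)]
  have h0 : PySem.List.pySetD (List.replicate (n + 1).toNat (-1)) 0 0 = dpRow p q r n.toNat 0 := by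
    rw [PySem.List.pySetD_of_nonneg _ _ (by omega)]
    apply List.ext_getElem
    · simp [dpRow_length]; omega
    · intro j h1 h2
      have hj : j < n.toNat + 1 := by simpa [dpRow_length] using h2
      rw [List.getElem_set, List.getElem_replicate, dpRow_get p q r n.toNat 0 j hj]
      by_cases hj0 : j = 0
      · subst hj0; simp [F_zero]
      · rw [if_neg (by omega), if_neg (by omega)]
  simp only [h0]
  rw [show (n + 1 : Int) = ((n.toNat : Int)) + 1 by omega]
  rw [foldA p q r hp hq hr n.toNat n.toNat (le_refl _)]
  have hread : PySem.List.pyGetD (dpRow p q r n.toNat n.toNat) n (-1) = F p q r n.toNat := by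
    rw [PySem.List.pyGetD_eq_getElem _ _ hn (by rw [dpRow_length]; push_cast; omega)]
    rw [dpRow_get p q r n.toNat n.toNat n.toNat (by omega), if_pos (le_refl _)]
  rw [hread]

-- named forms of B's loop bodies (definitionally equal to the port's lambdas)
def bodyC (n m x y b : Int) (best c : Int) : Int :=
  if PySem.Int.mod (n - b * x - c * y) m = 0 then
    (if b + c + PySem.Int.floordiv (n - b * x - c * y) m > best then
      b + c + PySem.Int.floordiv (n - b * x - c * y) m
    else best)
  else best

def byBound (n m x y b : Int) : Int :=
  if y = m then 0 else min (m - 1) (PySem.Int.floordiv (n - b * x) y)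

def bodyB (n m x y : Int) (best b : Int) : Int :=
  (PySem.List.pyRange 0 (byBound n m x y b + 1) 1).foldl (bodyC n m x y b) best

def bxBound (n m x : Int) : Int :=
  if x = m then 0 else min (m - 1) (PySem.Int.floordiv n x)

def Bfold (n m x y : Int) : Int :=
  (PySem.List.pyRange 0 (bxBound n m x + 1) 1).foldl (bodyB n m x y) (-1)

lemma B_eq (n p q r : Int) (h1 : ¬ n < 0) (h2 : ¬ (p ≤ 0 ∨ q ≤ 0 ∨ r ≤ 0)) :
    maximize_segments_alt n p q r =
      max (Bfold n (min p (min q r)) (p + q + r - min p (min q r) - max p (max q r))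
        (max p (max q r))) 0 := by
  unfold maximize_segments_alt Bfold bodyB bodyC bxBound byBound
  rw [if_neg h1, if_neg h2]

-- generic facts about max-accumulating folds
lemma foldl_mono_ge (g : Int → Int → Int) (hg : ∀ acc t, acc ≤ g acc t) (l : List Int) :
    ∀ acc, acc ≤ l.foldl g acc := by
  induction l with
  | nil => intro acc; simp
  | cons t l IH =>
    intro acc
    rw [List.foldl_cons]
    exact le_trans (hg acc t) (IH (g acc t))

lemma foldl_mono_le (g : Int → Int → Int) (V : Int) (l : List Int)
    (hg : ∀ acc t, t ∈ l → acc ≤ V → g acc t ≤ V) :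
    ∀ acc, acc ≤ V → l.foldl g acc ≤ V := by
  induction l with
  | nil => intro acc h; simpa using h
  | cons t l IH =>
    intro acc h
    rw [List.foldl_cons]
    exact IH (fun acc t ht hle => hg acc t (List.mem_cons_of_mem _ ht) hle) _
      (hg acc t List.mem_cons_self h)

lemma foldl_attain (g : Int → Int → Int) (hgmono : ∀ acc t, acc ≤ g acc t) (l : List Int)
    (t : Int) (ht : t ∈ l) (v : Int) (hv : ∀ acc, v ≤ g acc t) :
    ∀ acc, v ≤ l.foldl g acc := by
  induction l with
  | nil => cases ht
  | cons u l IH =>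
    intro acc
    rw [List.foldl_cons]
    rcases List.mem_cons.1 ht with rfl | hmem
    · exact le_trans (hv acc) (foldl_mono_ge g hgmono l _)
    · exact IH hmem _

-- representations of n as nonnegative combinations with a given segment count
def SegRep (u v w n t : Int) : Prop :=
  ∃ a b c : Int, 0 ≤ a ∧ 0 ≤ b ∧ 0 ≤ c ∧ a * u + b * v + c * w = n ∧ a + b + c = t

lemma rep_swap12 (u v w n t : Int) : SegRep u v w n t ↔ SegRep v u w n t := by
  constructor
  · rintro ⟨a, b, c, ha, hb, hc, hs, ht⟩
    exact ⟨b, a, c, hb, ha, hc, by linarith, by omega⟩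
  · rintro ⟨a, b, c, ha, hb, hc, hs, ht⟩
    exact ⟨b, a, c, hb, ha, hc, by linarith, by omega⟩

lemma rep_swap23 (u v w n t : Int) : SegRep u v w n t ↔ SegRep u w v n t := by
  constructor
  · rintro ⟨a, b, c, ha, hb, hc, hs, ht⟩
    exact ⟨a, c, b, ha, hc, hb, by linarith, by omega⟩
  · rintro ⟨a, b, c, ha, hb, hc, hs, ht⟩
    exact ⟨a, c, b, ha, hc, hb, by linarith, by omega⟩

-- sorting the three segment sizes does not change the representations
lemma rep_sorted (p q r n t : Int) :
    SegRep p q r n t ↔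
      SegRep (min p (min q r)) (p + q + r - min p (min q r) - max p (max q r))
        (max p (max q r)) n t := by
  rcases le_total p q with h1 | h1 <;> rcases le_total q r with h2 | h2 <;>
    rcases le_total p r with h3 | h3
  · -- p ≤ q ≤ r
    rw [show min p (min q r) = p by omega, show max p (max q r) = r by omega,
      show p + q + r - p - r = q by ring]
  · -- p ≤ q ≤ r ≤ p : all equal
    rw [show min p (min q r) = p by omega, show max p (max q r) = r by omega,
      show p + q + r - p - r = q by ring]
  · -- p ≤ r ≤ q
    rw [show min p (min q r) = p by omega, show max p (max q r) = q by omega,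
      show p + q + r - p - q = r by ring]
    exact rep_swap23 p q r n t
  · -- r ≤ p ≤ q
    rw [show min p (min q r) = r by omega, show max p (max q r) = q by omega,
      show p + q + r - r - q = p by ring]
    exact (rep_swap23 p q r n t).trans (rep_swap12 p r q n t)
  · -- q ≤ p ≤ r
    rw [show min p (min q r) = q by omega, show max p (max q r) = r by omega,
      show p + q + r - q - r = p by ring]
    exact rep_swap12 p q r n t
  · -- q ≤ r ≤ p
    rw [show min p (min q r) = q by omega, show max p (max q r) = p by omega,
      show p + q + r - q - p = r by ring]
    exact (rep_swap12 p q r n t).trans (rep_swap23 q p r n t)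
  · -- r ≤ q ≤ p ≤ r : all equal
    rw [show min p (min q r) = q by omega, show max p (max q r) = r by omega,
      show p + q + r - q - r = p by ring]
    exact rep_swap12 p q r n t
  · -- r ≤ q ≤ p
    rw [show min p (min q r) = r by omega, show max p (max q r) = p by omega,
      show p + q + r - r - p = q by ring]
    exact ((rep_swap12 p q r n t).trans (rep_swap23 q p r n t)).trans (rep_swap12 q r p n t)

-- every candidate inspected by B is a representation
lemma cand_rep (n M X Y : Int) (hn : 0 ≤ n) (hM : 1 ≤ M) (hMX : M ≤ X) (hXY : X ≤ Y)
    (b c : Int) (hb0 : 0 ≤ b) (hbx : b ≤ bxBound n M X) (hc0 : 0 ≤ c)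
    (hcy : c ≤ byBound n M X Y b)
    (hmod : PySem.Int.mod (n - b * X - c * Y) M = 0) :
    SegRep M X Y n (b + c + PySem.Int.floordiv (n - b * X - c * Y) M) := by
  have hbX : b * X ≤ n := by
    unfold bxBound at hbx
    split_ifs at hbx with hxm
    · have : b = 0 := by omega
      rw [this]; simpa using hn
    · have hb' : b ≤ PySem.Int.floordiv n X := by omega
      exact (PySem.Int.le_floordiv_iff_mul_le (by omega)).1 hb'
  have hcY : c * Y ≤ n - b * X := by
    unfold byBound at hcy
    split_ifs at hcy with hym
    · have : c = 0 := by omega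
      rw [this]; simpa using hbX
    · have hc' : c ≤ PySem.Int.floordiv (n - b * X) Y := by omega
      exact (PySem.Int.le_floordiv_iff_mul_le (by omega)).1 hc'
  have hrem : 0 ≤ n - b * X - c * Y := by omega
  have ha0 : 0 ≤ PySem.Int.floordiv (n - b * X - c * Y) M :=
    (PySem.Int.le_floordiv_iff_mul_le (by omega)).2 (by omega)
  have haM : PySem.Int.floordiv (n - b * X - c * Y) M * M = n - b * X - c * Y := by
    have := PySem.Int.floordiv_mul_add_mod (n - b * X - c * Y) M
    omega
  exact ⟨PySem.Int.floordiv (n - b * X - c * Y) M, b, c, ha0, hb0, hc0, by linarith, by omega⟩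

-- exchange argument: some optimal representation lies inside B's search bounds
lemma exchange (n M X Y t : Int) (_hn : 0 ≤ n) (hM : 1 ≤ M) (hMX : M ≤ X) (hXY : X ≤ Y)
    (hrep : SegRep M X Y n t) (hmax : ∀ t', SegRep M X Y n t' → t' ≤ t) :
    ∃ b c : Int, 0 ≤ b ∧ b ≤ bxBound n M X ∧ 0 ≤ c ∧ c ≤ byBound n M X Y b ∧
      PySem.Int.mod (n - b * X - c * Y) M = 0 ∧
      b + c + PySem.Int.floordiv (n - b * X - c * Y) M = t := by
  obtain ⟨a, b, c, ha, hb, hc, hs, ht⟩ := hrep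
  have hfd : ∀ k : Int, 0 ≤ k → k * M = n - 0 * X - 0 * Y →
      PySem.Int.mod (n - 0 * X - 0 * Y) M = 0 ∧
      PySem.Int.floordiv (n - 0 * X - 0 * Y) M = k := by
    intro k _ hk
    have hdvd : PySem.Int.mod (n - 0 * X - 0 * Y) M = 0 :=
      (PySem.Int.mod_eq_zero_iff_dvd _ _).2 ⟨k, by linarith [hk]⟩
    refine ⟨hdvd, ?_⟩
    have h1 := PySem.Int.floordiv_mul_add_mod (n - 0 * X - 0 * Y) M
    rw [hdvd, add_zero] at h1
    have h2 : PySem.Int.floordiv (n - 0 * X - 0 * Y) M * M = k * M := by omega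
    exact mul_right_cancel₀ (by omega) h2
  by_cases hym : Y = M
  · -- all three sizes equal the minimum: use only the minimum
    have hxm : X = M := by omega
    have hk : (a + b + c) * M = n - 0 * X - 0 * Y := by
      rw [hym, hxm] at hs; linear_combination hs
    obtain ⟨hmod, hfdk⟩ := hfd (a + b + c) (by omega) hk
    refine ⟨0, 0, le_refl 0, ?_, le_refl 0, ?_, hmod, ?_⟩
    · unfold bxBound; rw [if_pos hxm]
    · unfold byBound; rw [if_pos hym]
    · rw [hfdk]; omega
  · have hYM : M < Y := by omega
    -- fold the middle size into the minimum when they coincide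
    obtain ⟨a₁, b₁, ha₁, hb₁, hs₁, ht₁, hb₁x⟩ :
        ∃ a₁ b₁ : Int, 0 ≤ a₁ ∧ 0 ≤ b₁ ∧ a₁ * M + b₁ * X + c * Y = n ∧
          a₁ + b₁ + c = t ∧ b₁ ≤ bxBound n M X := by
      by_cases hxm : X = M
      · refine ⟨a + b, 0, by omega, le_refl 0, ?_, by omega, ?_⟩
        · rw [hxm] at hs; linear_combination hs
        · unfold bxBound; rw [if_pos hxm]
      · have hXM : M < X := by omega
        have hbM : b ≤ M - 1 := by
          by_contra hcon
          have hrep' : SegRep M X Y n (t + X - M) :=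
            ⟨a + X, b - M, c, by omega, by omega, hc, by linear_combination hs, by omega⟩
          have := hmax _ hrep'
          omega
        have hbn : b * X ≤ n := by
          have h1 : 0 ≤ a * M := mul_nonneg ha (by omega)
          have h2 : 0 ≤ c * Y := mul_nonneg hc (by omega)
          linarith
        have : b ≤ PySem.Int.floordiv n X := (PySem.Int.le_floordiv_iff_mul_le (by omega)).2 hbn
        refine ⟨a, b, ha, hb, hs, ht, ?_⟩
        unfold bxBound; rw [if_neg hxm]; omega
    -- the largest size is used fewer than M times in an optimum
    have hcM : c ≤ M - 1 := by
      by_contra hcon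
      have hrep' : SegRep M X Y n (t + Y - M) :=
        ⟨a₁ + Y, b₁, c - M, by omega, hb₁, by omega, by linear_combination hs₁, by omega⟩
      have := hmax _ hrep'
      omega
    have hcn : c * Y ≤ n - b₁ * X := by
      have h1 : 0 ≤ a₁ * M := mul_nonneg ha₁ (by omega)
      linarith
    have hcy : c ≤ byBound n M X Y b₁ := by
      unfold byBound; rw [if_neg hym]
      have := (PySem.Int.le_floordiv_iff_mul_le (b := Y) (by omega)).2 hcn
      omega
    have hmod : PySem.Int.mod (n - b₁ * X - c * Y) M = 0 :=
      (PySem.Int.mod_eq_zero_iff_dvd _ _).2 ⟨a₁, by linarith⟩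
    have hfdk : PySem.Int.floordiv (n - b₁ * X - c * Y) M = a₁ := by
      have h1 := PySem.Int.floordiv_mul_add_mod (n - b₁ * X - c * Y) M
      rw [hmod, add_zero] at h1
      have h2 : PySem.Int.floordiv (n - b₁ * X - c * Y) M * M = a₁ * M := by omega
      exact mul_right_cancel₀ (by omega) h2
    exact ⟨b₁, c, hb₁, hb₁x, hc, hcy, hmod, by rw [hfdk]; omega⟩

-- B's double loop computes exactly F
lemma Bfold_eq_F (n p q r : Int) (hn : 0 ≤ n) (hp : 1 ≤ p) (hq : 1 ≤ q) (hr : 1 ≤ r) :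
    Bfold n (min p (min q r)) (p + q + r - min p (min q r) - max p (max q r))
      (max p (max q r)) = F p q r n.toNat := by
  set M := min p (min q r) with hMdef
  set Y := max p (max q r) with hYdef
  set X := p + q + r - M - Y with hXdef
  have hM : 1 ≤ M := by omega
  have hMX : M ≤ X := by omega
  have hXY : X ≤ Y := by omega
  have hcast : ((n.toNat : Nat) : Int) = n := by omega
  have hFtoRep : F p q r n.toNat ≠ -1 → SegRep M X Y n (F p q r n.toNat) := by
    intro hne
    obtain ⟨a, b, c, ha, hb, hc, hs, ht⟩ := F_sound p q r n.toNat hne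
    rw [hcast] at hs
    exact (rep_sorted p q r n _).1 ⟨a, b, c, ha, hb, hc, hs, ht⟩
  have hRepBound : ∀ t, SegRep M X Y n t → t ≤ F p q r n.toNat := by
    intro t hrept
    obtain ⟨a, b, c, ha, hb, hc, hs, ht⟩ := (rep_sorted p q r n t).2 hrept
    rw [← hcast] at hs
    have := F_complete p q r (by omega) (by omega) (by omega) n.toNat a b c ha hb hc hs
    omega
  have hCmono : ∀ b acc t, acc ≤ bodyC n M X Y b acc t := by
    intro b acc t; unfold bodyC; split_ifs <;> omega
  have hBmono : ∀ acc b, acc ≤ bodyB n M X Y acc b := by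
    intro acc b
    exact foldl_mono_ge (bodyC n M X Y b) (hCmono b) _ acc
  have hFlow := F_ge_neg1 p q r n.toNat
  apply le_antisymm
  · -- Bfold ≤ F: every inspected candidate is a representation
    unfold Bfold
    apply foldl_mono_le _ _ _ ?_ _ (by omega)
    intro acc b hbmem hacc
    have hb := PySem.List.mem_pyRange_one.1 hbmem
    unfold bodyB
    apply foldl_mono_le _ _ _ ?_ _ hacc
    intro acc' c hcmem hacc'
    have hc := PySem.List.mem_pyRange_one.1 hcmem
    unfold bodyC
    split_ifs with h1 h2
    · exact hRepBound _ (cand_rep n M X Y hn hM hMX hXY b c (by omega) (by omega)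
        (by omega) (by omega) h1)
    · exact hacc'
    · exact hacc'
  · -- F ≤ Bfold: an optimal in-bounds candidate is inspected
    by_cases hF : F p q r n.toNat = -1
    · rw [hF]
      exact foldl_mono_ge _ hBmono _ (-1)
    · obtain ⟨b, c, hb0, hbx, hc0, hcy, hmod, hval⟩ :=
        exchange n M X Y (F p q r n.toNat) hn hM hMX hXY (hFtoRep hF) hRepBound
      have hbx0 : 0 ≤ bxBound n M X := by omega
      have hcy0 : 0 ≤ byBound n M X Y b := by omega
      unfold Bfold
      apply foldl_attain _ hBmono _ b (PySem.List.mem_pyRange_one.2 ⟨hb0, by omega⟩)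
      intro acc
      unfold bodyB
      apply foldl_attain _ (hCmono b) _ c (PySem.List.mem_pyRange_one.2 ⟨hc0, by omega⟩)
      intro acc'
      unfold bodyC
      rw [if_pos hmod, hval]
      split_ifs with h <;> omega

-- ===== VERDICT (by name: the statement is the Claim_ definition above) =====
theorem maximize_segments_spec : Claim_equal_maximize_segments := by
  unfold Claim_equal_maximize_segments
  intro n p q r _hdom hpre
  unfold Spec_maximize_segments
  obtain ⟨hn, hp, hq, hr⟩ := hpre
  rw [A_eq n p q r hn (by omega) (by omega) (by omega)]
  rw [B_eq n p q r (by omega) (by omega)]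
  rw [Bfold_eq_F n p q r hn (by omega) (by omega) (by omega)]
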